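-- pv_equiv track=rewrite | github.com/skorolev-test/test_assignment | Routing.py | generate_route
-- ===== SOURCE A (Python) =====
-- def generate_route(MST_graph):
--     route = []
--
--     def dfs(node):
--         route.append(node)
--         if node not in MST_graph:
--             return
--         for child in MST_graph[node]:
--             dfs(child)
--
--     dfs(0)
--     route.append(0)  # return back to the depot to complete the route
--     return route
-- ===== SOURCE B (Python) =====
-- def generate_route(MST_graph):
--     # Iterative DFS with an explicit stack instead of A's recursion.
--     route = []
--     stack = [0]
--     while stack:
--         node = stack.pop()
--         route.append(node)
--         if node in MST_graph:
--             stack.extend(reversed(MST_graph[node]))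
--     route.append(0)  # return back to the depot to complete the route
--     return route
-- ===== Notes on version B (the rewrite author's own statement) =====
-- stated objective: alternative
-- what changed: Replaces the recursive closure-based DFS with an iterative explicit-stack preorder traversal (children pushed in reversed order), avoiding Python recursion and its depth limit.
import Mathlib
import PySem

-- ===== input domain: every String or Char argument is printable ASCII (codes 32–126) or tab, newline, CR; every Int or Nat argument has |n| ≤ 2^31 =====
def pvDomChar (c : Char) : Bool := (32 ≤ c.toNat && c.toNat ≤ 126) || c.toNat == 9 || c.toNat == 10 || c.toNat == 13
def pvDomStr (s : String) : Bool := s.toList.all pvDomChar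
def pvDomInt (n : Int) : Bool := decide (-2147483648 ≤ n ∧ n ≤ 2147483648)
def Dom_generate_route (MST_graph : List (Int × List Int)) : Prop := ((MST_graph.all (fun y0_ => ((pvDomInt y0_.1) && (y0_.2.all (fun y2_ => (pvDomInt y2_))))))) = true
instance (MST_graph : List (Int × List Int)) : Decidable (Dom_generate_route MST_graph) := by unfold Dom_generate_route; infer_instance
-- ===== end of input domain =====

-- B replaces A's recursive closure DFS by an iterative explicit-stack preorder traversal;
-- equivalence of the RETURN value is proved on Pre_ (no cycle reachable from the depot 0).

-- ===== PORT A =====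
-- A's inner recursion is not structurally terminating (the graph may be cyclic, where the
-- Python raises RecursionError); the port adds a fuel argument that merely totalises the same
-- computation: under Pre_ the fuel `MST_graph.length + 1` bounds the recursion depth (proved below).
def pvDfsA (g : List (Int × List Int)) : Nat → Int → List Int
  | 0, node => [node]
  | fuel + 1, node =>
    match g.lookup node with
    | none => [node]                                   -- `if node not in MST_graph: return`
    | some cs => node :: cs.flatMap (pvDfsA g fuel)    -- `for child in MST_graph[node]: dfs(child)`

def generate_route (MST_graph : List (Int × List Int)) : List Int :=
  pvDfsA MST_graph (MST_graph.length + 1) 0 ++ [0]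

-- ===== PORT B =====
-- Source B's stack has its top at the END and pushes `reversed(children)`; the port mirrors the stack
-- with its top at the HEAD (the standard Lean orientation), so a pop-and-push step is `cs ++ rest`.
-- The loop is totalised by fuel counting the pops; (pvC g + 1) ^ (g.length + 2) is proved sufficient
-- under Pre_ below (pvC g = total number of child slots).
def pvC (g : List (Int × List Int)) : Nat := g.foldl (fun a p => a + p.2.length) 0

def pvRunB (g : List (Int × List Int)) : Nat → List Int → List Int
  | 0, _ => []
  | _ + 1, [] => []
  | fuel + 1, node :: rest =>
    match g.lookup node with
    | none => node :: pvRunB g fuel rest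
    | some cs => node :: pvRunB g fuel (cs ++ rest)

def generate_route_alt (MST_graph : List (Int × List Int)) : List Int :=
  pvRunB MST_graph ((pvC MST_graph + 1) ^ (MST_graph.length + 2)) [0] ++ [0]

-- ===== PRECONDITION & SPEC =====
-- children of a node, via the same first-match lookup the ports use
def pvNbrs (g : List (Int × List Int)) (n : Int) : List Int := (g.lookup n).getD []

-- add the elements of xs that are not yet in S (membership-wise, S ∪ xs)
def pvAddNew (S xs : List Int) : List Int :=
  xs.foldl (fun s x => if x ∈ s then s else s ++ [x]) S

-- nodes reachable from a seed set in at most k steps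
def pvReach (g : List (Int × List Int)) : Nat → List Int → List Int
  | 0, S => S
  | k + 1, S => pvReach g k (pvAddNew S (S.flatMap (pvNbrs g)))

-- Pre_: no cycle is reachable from the depot 0 — exactly the inputs on which the Python A
-- terminates (on a cycle reachable from 0 it raises RecursionError, and B loops).
-- (g.length + 1 steps saturate reachability: every intermediate node of a path is a key.)
def Pre_generate_route (MST_graph : List (Int × List Int)) : Prop :=
  ∀ n ∈ pvReach MST_graph (MST_graph.length + 1) [0],
    n ∉ pvReach MST_graph (MST_graph.length + 1) (pvNbrs MST_graph n)

instance (MST_graph : List (Int × List Int)) : Decidable (Pre_generate_route MST_graph) := by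
  unfold Pre_generate_route; infer_instance

def pvWitness_generate_route : (List (Int × List Int)) := [(0, [1, 2]), (1, [3]), (2, [])]

def Spec_generate_route (MST_graph : List (Int × List Int)) (out : List Int) : Prop :=
  out = generate_route_alt MST_graph
instance (MST_graph : List (Int × List Int)) (out : List Int) : Decidable (Spec_generate_route MST_graph out) := by
  unfold Spec_generate_route; infer_instance

-- ===== CLAIM (what is proved, stated in full; the proofs are below) =====
def Claim_equal_generate_route : Prop :=
  ∀ (MST_graph : List (Int × List Int)), Dom_generate_route MST_graph →
    Pre_generate_route MST_graph →
    Spec_generate_route MST_graph (generate_route MST_graph)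

-- ===== LEMMAS AND PROOFS =====

-- reachability in at most k steps, as a relation
inductive pvRchN (g : List (Int × List Int)) : Nat → Int → Int → Prop
  | refl (k a) : pvRchN g k a a
  | step {k a c} (b) (hb : b ∈ pvNbrs g a) (h : pvRchN g k b c) : pvRchN g (k + 1) a c

-- the DFS from n completes within depth f
inductive pvOk (g : List (Int × List Int)) : Nat → Int → Prop
  | leaf {f n} (h : g.lookup n = none) : pvOk g (f + 1) n
  | node {f n cs} (h : g.lookup n = some cs) (hc : ∀ c ∈ cs, pvOk g f c) : pvOk g (f + 1) n

theorem mem_pvAddNew (xs : List Int) : ∀ (S : List Int) (x : Int),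
    x ∈ pvAddNew S xs ↔ x ∈ S ∨ x ∈ xs := by
  induction xs with
  | nil => simp [pvAddNew]
  | cons y ys ih =>
    intro S x
    have h1 : pvAddNew S (y :: ys) = pvAddNew (if y ∈ S then S else S ++ [y]) ys := by
      simp [pvAddNew]
    rw [h1, ih]
    by_cases hy : y ∈ S
    · simp only [if_pos hy, List.mem_cons]
      constructor
      · rintro (h | h) <;> tauto
      · rintro (h | rfl | h)
        · exact Or.inl h
        · exact Or.inl hy
        · exact Or.inr h
    · simp only [if_neg hy, List.mem_append, List.mem_cons]
      tauto

theorem pvRchN_mono {g : List (Int × List Int)} {k : Nat} {a b : Int}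
    (h : pvRchN g k a b) : ∀ k', k ≤ k' → pvRchN g k' a b := by
  induction h with
  | refl k a => exact fun k' _ => .refl k' a
  | step b hb h ih =>
    intro k' hk
    obtain ⟨m, rfl⟩ : ∃ m, k' = m + 1 := ⟨k' - 1, by omega⟩
    exact .step b hb (ih m (by omega))

theorem pvRchN_zero {g : List (Int × List Int)} {a b : Int} (h : pvRchN g 0 a b) : a = b := by
  cases h; rfl

theorem pvRchN_succ_inv {g : List (Int × List Int)} {k : Nat} {a c : Int}
    (h : pvRchN g (k + 1) a c) : a = c ∨ ∃ b ∈ pvNbrs g a, pvRchN g k b c := by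
  cases h with
  | refl => exact Or.inl rfl
  | step b hb h => exact Or.inr ⟨b, hb, h⟩

theorem pvRchN_snoc {g : List (Int × List Int)} {k : Nat} {a b c : Int}
    (h : pvRchN g k a b) (hc : c ∈ pvNbrs g b) : pvRchN g (k + 1) a c := by
  induction h with
  | refl k a => exact .step c hc (.refl k c)
  | step b' hb' h ih => exact .step b' hb' (ih hc)

theorem mem_pvReach (g : List (Int × List Int)) : ∀ (k : Nat) (S : List Int) (x : Int),
    x ∈ pvReach g k S ↔ ∃ s ∈ S, pvRchN g k s x := by
  intro k
  induction k with
  | zero =>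
    intro S x
    constructor
    · intro h; exact ⟨x, h, pvRchN.refl 0 x⟩
    · rintro ⟨s, hs, h⟩; rw [← pvRchN_zero h]; exact hs
  | succ k ih =>
    intro S x
    rw [show pvReach g (k + 1) S = pvReach g k (pvAddNew S (S.flatMap (pvNbrs g))) from rfl, ih]
    constructor
    · rintro ⟨y, hy, hr⟩
      rw [mem_pvAddNew] at hy
      rcases hy with h | h
      · exact ⟨y, h, pvRchN_mono hr _ (by omega)⟩
      · obtain ⟨s, hs, hb⟩ := List.mem_flatMap.mp h
        exact ⟨s, hs, pvRchN.step y hb hr⟩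
    · rintro ⟨s, hs, hr⟩
      rcases pvRchN_succ_inv hr with rfl | ⟨b, hb, h⟩
      · exact ⟨s, by rw [mem_pvAddNew]; exact Or.inl hs, pvRchN.refl k s⟩
      · exact ⟨b, by rw [mem_pvAddNew]; exact Or.inr (List.mem_flatMap.mpr ⟨s, hs, hb⟩), h⟩

theorem pvLookup_mem_keys {n : Int} {cs : List Int} :
    ∀ {g : List (Int × List Int)}, g.lookup n = some cs → n ∈ g.map (·.1) := by
  intro g
  induction g with
  | nil => intro h; simp [List.lookup] at h
  | cons p t ih =>
    obtain ⟨k, v⟩ := p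
    intro h
    rw [List.lookup_cons] at h
    cases hbk : (n == k) with
    | true => simp [List.map_cons, eq_of_beq hbk]
    | false =>
      rw [hbk] at h
      exact List.mem_cons_of_mem _ (ih h)

theorem pvLookup_mem {n : Int} {cs : List Int} :
    ∀ {g : List (Int × List Int)}, g.lookup n = some cs → ∃ k, (k, cs) ∈ g := by
  intro g
  induction g with
  | nil => intro h; simp [List.lookup] at h
  | cons p t ih =>
    obtain ⟨k, v⟩ := p
    intro h
    rw [List.lookup_cons] at h
    cases hbk : (n == k) with
    | true =>
      rw [hbk] at h
      simp only [Option.some.injEq] at h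
      exact ⟨k, by simp [h]⟩
    | false =>
      rw [hbk] at h
      obtain ⟨k', hk'⟩ := ih h
      exact ⟨k', List.mem_cons_of_mem _ hk'⟩

theorem pvFoldl_init_le : ∀ (l : List (Int × List Int)) (a : Nat),
    a ≤ l.foldl (fun a p => a + p.2.length) a := by
  intro l
  induction l with
  | nil => intro a; simp
  | cons p t ih =>
    intro a
    calc a ≤ a + p.2.length := Nat.le_add_right _ _
    _ ≤ _ := ih _

theorem pvLen_le_pvC {g : List (Int × List Int)} {k : Int} {cs : List Int}
    (h : (k, cs) ∈ g) : cs.length ≤ pvC g := by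
  have main : ∀ (l : List (Int × List Int)) (a : Nat), (k, cs) ∈ l →
      cs.length ≤ l.foldl (fun a p => a + p.2.length) a := by
    intro l
    induction l with
    | nil => intro a h; simp at h
    | cons p t ih =>
      intro a hm
      rcases List.mem_cons.mp hm with h1 | h1
      · cases h1
        exact le_trans (Nat.le_add_left _ _) (pvFoldl_init_le t (a + cs.length))
      · exact ih _ h1
  exact main g 0 h

theorem pvDfsA_len_pos (g : List (Int × List Int)) :
    ∀ (f : Nat) (n : Int), 1 ≤ (pvDfsA g f n).length := by
  intro f n
  cases f with
  | zero => simp [pvDfsA]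
  | succ f => cases h : g.lookup n <;> simp [pvDfsA, h]

theorem pvDfsA_len_le (g : List (Int × List Int)) :
    ∀ (f : Nat) (n : Int), (pvDfsA g f n).length ≤ (pvC g + 1) ^ f := by
  intro f
  induction f with
  | zero => intro n; simp [pvDfsA]
  | succ f ih =>
    intro n
    cases h : g.lookup n with
    | none =>
      simp only [pvDfsA, h]
      calc ([n] : List Int).length = 1 := rfl
      _ ≤ (pvC g + 1) ^ (f + 1) := Nat.one_le_pow _ _ (by omega)
    | some cs =>
      simp only [pvDfsA, h, List.length_cons, List.length_flatMap]
      have hsum : (cs.map fun c => (pvDfsA g f c).length).sum ≤ cs.length * (pvC g + 1) ^ f := by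
        have := List.sum_le_card_nsmul (cs.map fun c => (pvDfsA g f c).length) ((pvC g + 1) ^ f)
          (by intro x hx; obtain ⟨c, _, rfl⟩ := List.mem_map.mp hx; exact ih c)
        simpa [smul_eq_mul] using this
      have hcs : cs.length ≤ pvC g := by
        obtain ⟨k, hk⟩ := pvLookup_mem h
        exact pvLen_le_pvC hk
      have hp : 1 ≤ (pvC g + 1) ^ f := Nat.one_le_pow _ _ (by omega)
      have : cs.length * (pvC g + 1) ^ f ≤ pvC g * (pvC g + 1) ^ f :=
        Nat.mul_le_mul_right _ hcs
      have hpow : (pvC g + 1) ^ (f + 1) = (pvC g + 1) ^ f + pvC g * (pvC g + 1) ^ f := by ring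
      omega

-- the stack machine consumes exactly the preorder listing of the node on top
theorem pvRunB_sim {g : List (Int × List Int)} :
    ∀ {f : Nat} {n : Int}, pvOk g f n → ∀ (F : Nat) (rest : List Int),
      (pvDfsA g f n).length ≤ F →
      pvRunB g F (n :: rest) = pvDfsA g f n ++ pvRunB g (F - (pvDfsA g f n).length) rest := by
  intro f n h
  induction h with
  | leaf hl =>
    intro F rest hF
    rename_i f' n'
    obtain ⟨F0, rfl⟩ : ∃ m, F = m + 1 := ⟨F - 1, by simp [pvDfsA, hl] at hF; omega⟩
    simp [pvRunB, pvDfsA, hl]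
  | node hl hc ih =>
    intro F rest hF
    rename_i f' n' cs
    have inner : ∀ (cs' : List Int), (∀ c ∈ cs', c ∈ cs) → ∀ (F : Nat) (rest : List Int),
        (cs'.flatMap (pvDfsA g f')).length ≤ F →
        pvRunB g F (cs' ++ rest) =
          cs'.flatMap (pvDfsA g f') ++ pvRunB g (F - (cs'.flatMap (pvDfsA g f')).length) rest := by
      intro cs'
      induction cs' with
      | nil => intro _ F rest _; simp
      | cons c cs'' ih2 =>
        intro hsub F rest hF2
        have hlen : (List.flatMap (pvDfsA g f') (c :: cs'')).length
            = (pvDfsA g f' c).length + (cs''.flatMap (pvDfsA g f')).length := by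
          simp
        rw [hlen] at hF2
        have hc1 : (pvDfsA g f' c).length ≤ F := by omega
        have step1 := ih c (hsub c (by simp)) F (cs'' ++ rest) hc1
        rw [List.cons_append, step1]
        have step2 := ih2 (fun x hx => hsub x (by simp [hx])) (F - (pvDfsA g f' c).length) rest
          (by omega)
        rw [step2, List.flatMap_cons, List.append_assoc]
        have harith : F - (pvDfsA g f' c).length - (List.flatMap (pvDfsA g f') cs'').length
            = F - (pvDfsA g f' c ++ List.flatMap (pvDfsA g f') cs'').length := by
          rw [List.length_append]; omega
        rw [harith]
    have hdfs : pvDfsA g (f' + 1) n' = n' :: cs.flatMap (pvDfsA g f') := by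
      simp [pvDfsA, hl]
    obtain ⟨F0, rfl⟩ : ∃ m, F = m + 1 := ⟨F - 1, by
      have := pvDfsA_len_pos g (f' + 1) n'; omega⟩
    rw [hdfs] at hF ⊢
    simp only [List.length_cons] at hF
    show pvRunB g (F0 + 1) (n' :: rest) = _
    rw [show pvRunB g (F0 + 1) (n' :: rest) = n' :: pvRunB g F0 (cs ++ rest) by
      simp [pvRunB, hl]]
    rw [inner cs (fun _ h => h) F0 rest (by omega)]
    simp only [List.cons_append, List.length_cons]
    congr 3
    omega

theorem pvRunB_nil (g : List (Int × List Int)) : ∀ k, pvRunB g k [] = [] := by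
  intro k; cases k <;> rfl

-- pigeonhole: under Pre_, the DFS from 0 completes within depth g.length + 1
theorem pvOkAux (g : List (Int × List Int)) (hacyc : Pre_generate_route g) :
    ∀ (fuel : Nat) (seen : List Int) (n : Int),
      seen.Nodup → (∀ s ∈ seen, s ∈ g.map (·.1)) → seen.length + fuel = g.length →
      pvRchN g seen.length 0 n →
      (∀ s ∈ seen, ∃ b ∈ pvNbrs g s, pvRchN g seen.length b n) →
      pvOk g (fuel + 1) n := by
  intro fuel
  induction fuel with
  | zero =>
    intro seen n hnd hsub hlen h0 hinv
    cases hl : g.lookup n with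
    | none => exact .leaf hl
    | some cs =>
      exfalso
      have hnotin : n ∉ seen := by
        intro hn
        obtain ⟨b, hb, hr⟩ := hinv n hn
        exact hacyc n
          ((mem_pvReach g _ _ _).mpr ⟨0, by simp, pvRchN_mono h0 _ (by omega)⟩)
          ((mem_pvReach g _ _ _).mpr ⟨b, hb, pvRchN_mono hr _ (by omega)⟩)
      have hnk : n ∈ g.map (·.1) := pvLookup_mem_keys hl
      have hsp : (n :: seen).Subperm (g.map (·.1)) :=
        List.Nodup.subperm (List.nodup_cons.mpr ⟨hnotin, hnd⟩) (by
          intro x hx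
          rcases List.mem_cons.mp hx with rfl | hx
          · exact hnk
          · exact hsub x hx)
      have hle := hsp.length_le
      simp only [List.length_cons, List.length_map] at hle
      omega
  | succ fuel ih =>
    intro seen n hnd hsub hlen h0 hinv
    cases hl : g.lookup n with
    | none => exact .leaf hl
    | some cs =>
      have hnotin : n ∉ seen := by
        intro hn
        obtain ⟨b, hb, hr⟩ := hinv n hn
        exact hacyc n
          ((mem_pvReach g _ _ _).mpr ⟨0, by simp, pvRchN_mono h0 _ (by omega)⟩)
          ((mem_pvReach g _ _ _).mpr ⟨b, hb, pvRchN_mono hr _ (by omega)⟩)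
      have hnk : n ∈ g.map (·.1) := pvLookup_mem_keys hl
      refine .node hl (fun c hc => ?_)
      have hcn : c ∈ pvNbrs g n := by simp [pvNbrs, hl, hc]
      refine ih (n :: seen) c (List.nodup_cons.mpr ⟨hnotin, hnd⟩) ?_ (by simp only [List.length_cons]; omega) ?_ ?_
      · intro s hs
        rcases List.mem_cons.mp hs with rfl | hs
        · exact hnk
        · exact hsub s hs
      · simpa using pvRchN_snoc h0 hcn
      · intro s hs
        rcases List.mem_cons.mp hs with rfl | hs
        · exact ⟨c, hcn, .refl _ c⟩
        · obtain ⟨b, hb, hr⟩ := hinv s hs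
          exact ⟨b, hb, by simpa using pvRchN_snoc hr hcn⟩

-- ===== VERDICT (by name: the statement is the Claim_ definition above) =====
theorem generate_route_spec : Claim_equal_generate_route := by
  intro g _ hpre
  show generate_route g = generate_route_alt g
  have hOk : pvOk g (g.length + 1) 0 := by
    have := pvOkAux g hpre g.length [] 0 (by simp) (by simp) (by simp) (pvRchN.refl 0 0) (by simp)
    simpa using this
  have hlen : (pvDfsA g (g.length + 1) 0).length ≤ (pvC g + 1) ^ (g.length + 2) := by
    calc (pvDfsA g (g.length + 1) 0).length ≤ (pvC g + 1) ^ (g.length + 1) :=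
          pvDfsA_len_le g _ 0
    _ ≤ (pvC g + 1) ^ (g.length + 2) := Nat.pow_le_pow_right (by omega) (by omega)
  unfold generate_route generate_route_alt
  rw [pvRunB_sim hOk _ [] hlen, pvRunB_nil, List.append_nil]
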